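-- pv_equiv track=rewrite | github.com/JulioNectar/glow-engine-colorizer-utility | widgets/plist_colors_widget.py | categorize_colors
-- ===== SOURCE A (Python) =====
-- def categorize_colors(color_entries):
--     """Categorize colors logically"""
--     categories = {
--         'System Colors': [],
--         'Control Colors': [],
--         'Text Colors': [],
--         'Background Colors': [],
--         'Other Colors': []
--     }
--
--     for key in color_entries.keys():
--         key_lower = key.lower()
--
--         if any(word in key_lower for word in ['system', 'blue', 'green', 'red', 'orange']):
--             categories['System Colors'].append(key)
--         elif any(word in key_lower for word in ['control', 'button', 'bezel']):
--             categories['Control Colors'].append(key)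
--         elif any(word in key_lower for word in ['text', 'label', 'font']):
--             categories['Text Colors'].append(key)
--         elif any(word in key_lower for word in ['background', 'window', 'desktop']):
--             categories['Background Colors'].append(key)
--         else:
--             categories['Other Colors'].append(key)
--
--     return categories
-- ===== SOURCE B (Python) =====
-- _CATEGORY_WORDS = [
--     ('System Colors', ['system', 'blue', 'green', 'red', 'orange']),
--     ('Control Colors', ['control', 'button', 'bezel']),
--     ('Text Colors', ['text', 'label', 'font']),
--     ('Background Colors', ['background', 'window', 'desktop']),
-- ]
--
--
-- def _category(key):
--     key_lower = key.lower()
--     for name, words in _CATEGORY_WORDS: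
--         if any(w in key_lower for w in words):
--             return name
--     return 'Other Colors'
--
--
-- def categorize_colors(color_entries):
--     names = [name for name, _ in _CATEGORY_WORDS] + ['Other Colors']
--     return {name: [k for k in color_entries if _category(k) == name] for name in names}
-- ===== Notes on version B (the rewrite author's own statement) =====
-- stated objective: idiomatic
-- what changed: Replaces the single-pass branch ladder that mutates lists inside a pre-built dict with a keyword table, a first-match classifier function, and a dict comprehension that builds each category by filtering the keys (category-outer instead of key-outer traversal).
import Mathlib
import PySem

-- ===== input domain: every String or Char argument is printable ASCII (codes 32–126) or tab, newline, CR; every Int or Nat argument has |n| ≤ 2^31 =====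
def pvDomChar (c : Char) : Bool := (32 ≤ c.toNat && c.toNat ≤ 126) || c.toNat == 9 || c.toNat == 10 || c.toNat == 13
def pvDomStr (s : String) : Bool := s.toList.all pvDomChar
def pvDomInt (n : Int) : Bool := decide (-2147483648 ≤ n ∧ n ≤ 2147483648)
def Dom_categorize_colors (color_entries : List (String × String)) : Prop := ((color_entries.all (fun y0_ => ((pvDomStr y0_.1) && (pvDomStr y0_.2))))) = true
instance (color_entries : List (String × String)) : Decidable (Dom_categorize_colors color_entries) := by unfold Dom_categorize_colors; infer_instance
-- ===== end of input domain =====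

-- B replaces A's single-pass branch ladder mutating a dict with a keyword table, a
-- first-match classifier and one filter per category (category-outer traversal); idiomatic, not faster.

-- ===== PORT A =====
-- A's per-key branch ladder: the four `any(word in key_lower …)` tests in order, appending
-- to the matching category's list (the dict always contains the five keys, so d[k].append
-- is d.modify with default []).
def pvStepA (d : PySem.Dict String (List String)) (key : String) : PySem.Dict String (List String) :=
  let key_lower := PySem.Str.lower key
  if ["system", "blue", "green", "red", "orange"].any (fun w => PySem.Str.isIn w key_lower) then
    d.modify "System Colors" [] (· ++ [key])
  else if ["control", "button", "bezel"].any (fun w => PySem.Str.isIn w key_lower) then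
    d.modify "Control Colors" [] (· ++ [key])
  else if ["text", "label", "font"].any (fun w => PySem.Str.isIn w key_lower) then
    d.modify "Text Colors" [] (· ++ [key])
  else if ["background", "window", "desktop"].any (fun w => PySem.Str.isIn w key_lower) then
    d.modify "Background Colors" [] (· ++ [key])
  else
    d.modify "Other Colors" [] (· ++ [key])

def categorize_colors (color_entries : List (String × String)) : List (String × List String) :=
  let categories : PySem.Dict String (List String) :=
    PySem.Dict.ofList [("System Colors", []), ("Control Colors", []), ("Text Colors", []),
                       ("Background Colors", []), ("Other Colors", [])]
  (((PySem.Dict.ofList color_entries).keys).foldl pvStepA categories).items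

-- ===== PORT B =====
def pvCategoryWords : List (String × List String) :=
  [("System Colors", ["system", "blue", "green", "red", "orange"]),
   ("Control Colors", ["control", "button", "bezel"]),
   ("Text Colors", ["text", "label", "font"]),
   ("Background Colors", ["background", "window", "desktop"])]

-- Source B's `_category`: first table row one of whose words occurs in key.lower(), else 'Other Colors'
def pvFirstCat (kl : String) : List (String × List String) → String
  | [] => "Other Colors"
  | (name, words) :: rest =>
      if words.any (fun w => PySem.Str.isIn w kl) then name else pvFirstCat kl rest

def pvCategory (key : String) : String :=
  pvFirstCat (PySem.Str.lower key) pvCategoryWords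

def categorize_colors_alt (color_entries : List (String × String)) : List (String × List String) :=
  let names := (pvCategoryWords.map Prod.fst) ++ ["Other Colors"]
  names.map (fun name =>
    (name, ((PySem.Dict.ofList color_entries).keys).filter (fun k => pvCategory k == name)))

-- ===== PRECONDITION & SPEC =====
def Spec_categorize_colors (color_entries : List (String × String)) (out : List (String × List String)) : Prop := out = categorize_colors_alt color_entries
instance (color_entries : List (String × String)) (out : List (String × List String)) : Decidable (Spec_categorize_colors color_entries out) := by unfold Spec_categorize_colors; infer_instance

-- ===== CLAIM (what is proved, stated in full; the proofs are below) =====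
def Claim_equal_categorize_colors : Prop := ∀ (color_entries : List (String × String)), Dom_categorize_colors color_entries → Spec_categorize_colors color_entries (categorize_colors color_entries)

-- ===== LEMMAS AND PROOFS =====

-- A's branch ladder is exactly "append key to the category pvCategory chooses"
theorem pvStepA_eq (d : PySem.Dict String (List String)) (key : String) :
    pvStepA d key = d.modify (pvCategory key) [] (· ++ [key]) := by
  simp only [pvStepA, pvCategory, pvCategoryWords, pvFirstCat]
  split_ifs <;> rfl

theorem pvCategory_mem (key : String) :
    pvCategory key ∈ ["System Colors", "Control Colors", "Text Colors",
                      "Background Colors", "Other Colors"] := by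
  simp only [pvCategory, pvCategoryWords, pvFirstCat]
  split_ifs <;> simp

theorem pv_loop_eq (ks : List String) (d : PySem.Dict String (List String)) :
    ks.foldl pvStepA d
      = (ks.map (fun k => (pvCategory k, k))).foldl
          (fun d p => d.modify p.1 [] (· ++ [p.2])) d := by
  rw [List.foldl_map]
  exact PySem.List.foldl_congr_mem _ _ _ _ (fun d k _ => pvStepA_eq d k)

theorem categorize_colors_spec_aux (color_entries : List (String × String)) :
    categorize_colors color_entries = categorize_colors_alt color_entries := by
  unfold categorize_colors categorize_colors_alt
  set ks := (PySem.Dict.ofList color_entries).keys with hks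
  set d0 : PySem.Dict String (List String) :=
    PySem.Dict.ofList [("System Colors", []), ("Control Colors", []), ("Text Colors", []),
                       ("Background Colors", []), ("Other Colors", [])] with hd0
  -- the final dict's keys are still exactly the initial five, in order
  have hkeys : (ks.foldl pvStepA d0).keys = d0.keys := by
    rw [pv_loop_eq]
    rw [PySem.Dict.keys_foldl_modify_key]
    rw [PySem.Set.update_eq_append_filter]
    have : (PySem.Set.ofList ((ks.map (fun k => (pvCategory k, k))).map Prod.fst)).filter
        (fun y => !(PySem.Set.contains d0.keys y)) = [] := by
      rw [List.filter_eq_nil_iff]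
      intro a ha
      have ha' := (PySem.Set.mem_ofList _ _).mp ha
      simp only [List.map_map, List.mem_map, Function.comp] at ha'
      obtain ⟨k, _, hk⟩ := ha'
      have := pvCategory_mem k
      rw [hk] at this
      rw [hd0]
      fin_cases this <;> decide
    rw [this, List.append_nil]
  have hnd : (ks.foldl pvStepA d0).keys.Nodup := by
    rw [hkeys, hd0]; decide
  -- per-category contents
  have hgetD : ∀ c, (ks.foldl pvStepA d0).getD c []
      = d0.getD c [] ++ ks.filter (fun k => pvCategory k == c) := by
    intro c
    rw [pv_loop_eq, PySem.Dict.getD_foldl_modify_append]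
    congr 1
    rw [List.filter_map]
    have h1 : ((fun p : String × String => p.1 == c) ∘ fun k => (pvCategory k, k))
        = (fun k => pvCategory k == c) := rfl
    have h2 : ((fun x : String × String => x.2) ∘ fun k => (pvCategory k, k))
        = fun k => k := rfl
    rw [h1, List.map_map, h2, List.map_id']
  rw [PySem.Dict.items_eq_map_keys _ hnd []]
  rw [hkeys]
  have hk5 : d0.keys = ["System Colors", "Control Colors", "Text Colors",
                        "Background Colors", "Other Colors"] := by rw [hd0]; decide
  rw [hk5]
  have hD : ∀ c, d0.getD c [] = [] := by
    intro c
    have he : d0 = ((((PySem.Dict.empty.insert "System Colors" ([] : List String)).insert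
        "Control Colors" []).insert "Text Colors" []).insert "Background Colors" []).insert
        "Other Colors" [] := by rw [hd0]; rfl
    rw [he]
    simp only [PySem.Dict.getD_insert, PySem.Dict.getD_empty]
    split_ifs <;> rfl
  simp only [List.map_cons, List.map_nil, hgetD, hD, List.nil_append, pvCategoryWords]
  rfl

-- ===== VERDICT (by name: the statement is the Claim_ definition above) =====
theorem categorize_colors_spec : Claim_equal_categorize_colors := by
  intro ce _
  exact categorize_colors_spec_aux ce
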